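-- pv_equiv track=rewrite | github.com/pdh9523/Algorithm | Python/백준/Silver/13022. 늑대와 올바른 단어/늑대와 올바른 단어.py | check
-- ===== SOURCE A (Python) =====
-- def check(word):
--     now = "w"
--     target = "wolf"
--     idx = {t: i for i,t in enumerate(target)}
--     visit = [0] * 4
--     for char in word:
--         if now == char:
--             visit[idx[now]] += 1
--         elif (nxt:=target[(idx[now]+1)%4]) == char:
--             now = nxt
--             if now == "w":
--                 if all(x==visit[0] for x in visit):
--                     visit = [0] * 4
--                 else: return 0
--             visit[idx[now]] += 1
--         else: return 0
--
--     return int(all(x == visit[0] for x in visit))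
-- ===== SOURCE B (Python) =====
-- def check(word):
--     # Decompose into runs of equal characters, then validate chunks of 4 runs:
--     # each chunk must be w,o,l,f with all four run lengths equal.
--     runs = []
--     i = 0
--     n = len(word)
--     while i < n:
--         j = i
--         while j < n and word[j] == word[i]:
--             j += 1
--         runs.append((word[i], j - i))
--         i = j
--     if len(runs) % 4:
--         return 0
--     for b in range(0, len(runs), 4):
--         (c1, n1), (c2, n2), (c3, n3), (c4, n4) = runs[b:b+4]
--         if (c1, c2, c3, c4) != ('w', 'o', 'l', 'f'):
--             return 0
--         if not (n1 == n2 == n3 == n4):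
--             return 0
--     return 1
-- ===== Notes on version B (the rewrite author's own statement) =====
-- stated objective: alternative
-- what changed: Replaced A's per-character state machine (current letter, 4-counter array, wrap-around reset) with a run-length decomposition of the word followed by a chunked validation: runs taken 4 at a time must spell w,o,l,f with equal lengths.
import Mathlib
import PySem

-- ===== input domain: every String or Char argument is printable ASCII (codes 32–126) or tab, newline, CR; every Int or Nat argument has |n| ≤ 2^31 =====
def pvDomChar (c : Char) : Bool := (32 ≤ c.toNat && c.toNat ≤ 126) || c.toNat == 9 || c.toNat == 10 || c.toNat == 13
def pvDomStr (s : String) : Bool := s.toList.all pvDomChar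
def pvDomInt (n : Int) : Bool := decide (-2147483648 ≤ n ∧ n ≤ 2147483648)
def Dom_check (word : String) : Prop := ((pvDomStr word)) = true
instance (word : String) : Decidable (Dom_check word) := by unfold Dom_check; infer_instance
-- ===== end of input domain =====

-- B replaces A's per-character state machine by a run-length decomposition plus a
-- chunked (4 runs at a time) validation pass; same O(n) cost, different decomposition.

-- ===== PORT A =====
-- A's `now` and the letters of `word` are one-character Python strings, ported as Char.
-- The early `return 0` inside the loop is modelled by an Option result (none = returned 0).
def pvTargetA : List Char := "wolf".toList          -- target = "wolf"

def pvIdxA : PySem.Dict Char Int :=                 -- idx = {t: i for i, t in enumerate(target)}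
  (PySem.List.enumerate pvTargetA).foldl (fun d p => d.insert p.2 p.1) PySem.Dict.empty

-- visit[idx[now]] += 1  (`now` is always a letter of target and the index is in 0..3,
--  so the KeyError/IndexError of the subscripts are unreachable; getD stands in for them)
def pvBumpA (now : Char) (visit : List Int) : List Int :=
  visit.set (pvIdxA.getD now 0).toNat ((visit.getD (pvIdxA.getD now 0).toNat 0) + 1)

-- all(x == visit[0] for x in visit)   (visit always has 4 entries, visit[0] in range)
def pvAllEqA (visit : List Int) : Bool := visit.all (fun x => x == visit.getD 0 0)

def checkLoop : List Char → Char → List Int → Option (Char × List Int)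
  | [], now, visit => some (now, visit)
  | ch :: rest, now, visit =>
    if now == ch then
      checkLoop rest now (pvBumpA now visit)
    else
      let nxt := pvTargetA.getD (PySem.Int.mod (pvIdxA.getD now 0 + 1) 4).toNat ' '
      if nxt == ch then
        if nxt == 'w' then
          if pvAllEqA visit then checkLoop rest nxt (pvBumpA nxt [0, 0, 0, 0])
          else none
        else checkLoop rest nxt (pvBumpA nxt visit)
      else none

def check (word : String) : Int :=
  match checkLoop word.toList 'w' [0, 0, 0, 0] with
  | none => 0
  | some (_, visit) => if pvAllEqA visit then 1 else 0

-- ===== PORT B =====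
-- run-length decomposition (the outer `while i < n` loop of Source B: one run per step)
def runsOf : List Char → List (Char × Int)
  | [] => []
  | c :: cs =>
    (c, 1 + ((cs.takeWhile (fun x => x == c)).length : Int)) ::
      runsOf (cs.dropWhile (fun x => x == c))
  termination_by l => l.length
  decreasing_by
    simpa using Nat.lt_succ_of_le (List.length_dropWhile_le _ _)

-- the chunk loop `for b in range(0, len(runs), 4)` of Source B (catch-all = len(runs) % 4 check)
def validRuns : List (Char × Int) → Bool
  | [] => true
  | (c1, n1) :: (c2, n2) :: (c3, n3) :: (c4, n4) :: rest =>
      c1 == 'w' && c2 == 'o' && c3 == 'l' && c4 == 'f' &&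
      n1 == n2 && n2 == n3 && n3 == n4 && validRuns rest
  | _ => false

def check_alt (word : String) : Int :=
  if validRuns (runsOf word.toList) then 1 else 0

-- ===== PRECONDITION & SPEC =====
def Spec_check (word : String) (out : Int) : Prop := out = check_alt word
instance (word : String) (out : Int) : Decidable (Spec_check word out) := by unfold Spec_check; infer_instance

-- ===== CLAIM (what is proved, stated in full; the proofs are below) =====
def Claim_equal_check : Prop := ∀ (word : String), Dom_check word → Spec_check word (check word)


-- ===== LEMMAS AND PROOFS =====

-- result of the whole function from a loop outcome
def resOf : Option (Char × List Int) → Int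
  | none => 0
  | some (_, visit) => if pvAllEqA visit then 1 else 0

lemma check_eq_resOf (word : String) :
    check word = resOf (checkLoop word.toList 'w' [0, 0, 0, 0]) := by
  unfold check resOf
  cases checkLoop word.toList 'w' [0, 0, 0, 0] with
  | none => rfl
  | some p => cases p; rfl

-- evaluation of idx / target on the four letters
lemma idx_w : pvIdxA.getD 'w' 0 = 0 := by decide
lemma idx_o : pvIdxA.getD 'o' 0 = 1 := by decide
lemma idx_l : pvIdxA.getD 'l' 0 = 2 := by decide
lemma idx_f : pvIdxA.getD 'f' 0 = 3 := by decide

lemma nxt_w : pvTargetA.getD (PySem.Int.mod (pvIdxA.getD 'w' 0 + 1) 4).toNat ' ' = 'o' := by decide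
lemma nxt_o : pvTargetA.getD (PySem.Int.mod (pvIdxA.getD 'o' 0 + 1) 4).toNat ' ' = 'l' := by decide
lemma nxt_l : pvTargetA.getD (PySem.Int.mod (pvIdxA.getD 'l' 0 + 1) 4).toNat ' ' = 'f' := by decide
lemma nxt_f : pvTargetA.getD (PySem.Int.mod (pvIdxA.getD 'f' 0 + 1) 4).toNat ' ' = 'w' := by decide

lemma bump_w (a b c d : Int) : pvBumpA 'w' [a, b, c, d] = [a + 1, b, c, d] := by
  simp [pvBumpA, idx_w]
lemma bump_o (a b c d : Int) : pvBumpA 'o' [a, b, c, d] = [a, b + 1, c, d] := by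
  simp [pvBumpA, idx_o]
lemma bump_l (a b c d : Int) : pvBumpA 'l' [a, b, c, d] = [a, b, c + 1, d] := by
  simp [pvBumpA, idx_l]
lemma bump_f (a b c d : Int) : pvBumpA 'f' [a, b, c, d] = [a, b, c, d + 1] := by
  simp [pvBumpA, idx_f]

lemma allEq_iff (a b c d : Int) :
    pvAllEqA [a, b, c, d] = true ↔ (b = a ∧ c = a ∧ d = a) := by
  simp [pvAllEqA]

lemma allEq_false (a b c d : Int) (h : ¬(b = a ∧ c = a ∧ d = a)) :
    pvAllEqA [a, b, c, d] = false := by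
  rw [Bool.eq_false_iff, ne_eq, allEq_iff]; exact h

-- consuming a run of characters equal to the current state letter
lemma consume_w (m : Nat) (rest : List Char) (a b c d : Int) :
    checkLoop (List.replicate m 'w' ++ rest) 'w' [a, b, c, d]
      = checkLoop rest 'w' [a + m, b, c, d] := by
  induction m generalizing a with
  | zero => simp
  | succ m ih =>
    rw [List.replicate_succ, List.cons_append]
    simp only [checkLoop, BEq.rfl, if_pos, bump_w]
    rw [ih]
    congr 1
    push_cast; ring_nf

lemma consume_o (m : Nat) (rest : List Char) (a b c d : Int) :
    checkLoop (List.replicate m 'o' ++ rest) 'o' [a, b, c, d]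
      = checkLoop rest 'o' [a, b + m, c, d] := by
  induction m generalizing b with
  | zero => simp
  | succ m ih =>
    rw [List.replicate_succ, List.cons_append]
    simp only [checkLoop, BEq.rfl, if_pos, bump_o]
    rw [ih]
    congr 1
    push_cast; ring_nf

lemma consume_l (m : Nat) (rest : List Char) (a b c d : Int) :
    checkLoop (List.replicate m 'l' ++ rest) 'l' [a, b, c, d]
      = checkLoop rest 'l' [a, b, c + m, d] := by
  induction m generalizing c with
  | zero => simp
  | succ m ih =>
    rw [List.replicate_succ, List.cons_append]
    simp only [checkLoop, BEq.rfl, if_pos, bump_l]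
    rw [ih]
    congr 1
    push_cast; ring_nf

lemma consume_f (m : Nat) (rest : List Char) (a b c d : Int) :
    checkLoop (List.replicate m 'f' ++ rest) 'f' [a, b, c, d]
      = checkLoop rest 'f' [a, b, c, d + m] := by
  induction m generalizing d with
  | zero => simp
  | succ m ih =>
    rw [List.replicate_succ, List.cons_append]
    simp only [checkLoop, BEq.rfl, if_pos, bump_f]
    rw [ih]
    congr 1
    push_cast; ring_nf

-- splitting off the first run
lemma run_split (c : Char) (cs : List Char) :
    cs = List.replicate (cs.takeWhile (fun x => x == c)).length c
            ++ cs.dropWhile (fun x => x == c) := by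
  conv_lhs => rw [← List.takeWhile_append_dropWhile (p := fun x => x == c) (l := cs)]
  congr 1
  apply List.eq_replicate_of_mem
  intro b hb
  have := List.mem_takeWhile_imp hb
  simpa using this

lemma run_split_head (c x : Char) (cs xs : List Char)
    (h : cs.dropWhile (fun y => y == c) = x :: xs) : x ≠ c := by
  have := List.head?_dropWhile_not (fun y => y == c) cs
  rw [h] at this
  simpa using this

lemma runsOf_cons (c : Char) (cs : List Char) :
    runsOf (c :: cs)
      = (c, 1 + ((cs.takeWhile (fun x => x == c)).length : Int))
          :: runsOf (cs.dropWhile (fun x => x == c)) := by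
  rw [runsOf]

-- validRuns shape lemmas
lemma validRuns_one (p : Char × Int) : validRuns [p] = false := by
  obtain ⟨c, n⟩ := p; rfl
lemma validRuns_two (p q : Char × Int) : validRuns [p, q] = false := by
  obtain ⟨c, n⟩ := p; obtain ⟨c2, n2⟩ := q; rfl
lemma validRuns_three (p q r : Char × Int) : validRuns [p, q, r] = false := by
  obtain ⟨c, n⟩ := p; obtain ⟨c2, n2⟩ := q; obtain ⟨c3, n3⟩ := r; rfl

lemma validRuns_not_w (c : Char) (n : Int) (rs : List (Char × Int)) (hc : c ≠ 'w') :
    validRuns ((c, n) :: rs) = false := by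
  match rs with
  | [] => exact validRuns_one _
  | [q] => exact validRuns_two _ _
  | [q, r] => exact validRuns_three _ _ _
  | ⟨c2, n2⟩ :: ⟨c3, n3⟩ :: ⟨c4, n4⟩ :: rs' =>
    simp [validRuns, hc]

lemma validRuns_not_o (p : Char × Int) (c : Char) (n : Int) (rs : List (Char × Int))
    (hc : c ≠ 'o') : validRuns (p :: (c, n) :: rs) = false := by
  obtain ⟨c1, n1⟩ := p
  match rs with
  | [] => exact validRuns_two _ _
  | [q] => exact validRuns_three _ _ _
  | ⟨c3, n3⟩ :: ⟨c4, n4⟩ :: rs' =>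
    simp [validRuns, hc]

lemma validRuns_not_l (p q : Char × Int) (c : Char) (n : Int) (rs : List (Char × Int))
    (hc : c ≠ 'l') : validRuns (p :: q :: (c, n) :: rs) = false := by
  obtain ⟨c1, n1⟩ := p; obtain ⟨c2, n2⟩ := q
  match rs with
  | [] => exact validRuns_three _ _ _
  | ⟨c4, n4⟩ :: rs' =>
    simp [validRuns, hc]

lemma validRuns_not_f (p q r : Char × Int) (c : Char) (n : Int) (rs : List (Char × Int))
    (hc : c ≠ 'f') : validRuns (p :: q :: r :: (c, n) :: rs) = false := by
  obtain ⟨c1, n1⟩ := p; obtain ⟨c2, n2⟩ := q; obtain ⟨c3, n3⟩ := r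
  simp [validRuns, hc]

lemma validRuns_chunk (k k2 k3 k4 : Int) (rs : List (Char × Int)) :
    validRuns (('w', k) :: ('o', k2) :: ('l', k3) :: ('f', k4) :: rs)
      = ((k == k2 && k2 == k3 && k3 == k4) && validRuns rs) := by
  simp [validRuns, Bool.and_assoc]

-- once the machine has left 'w' with visit[0] = 0 and visit[1] ≥ 1, the result is 0
lemma fail_lemma (l : List Char) : ∀ (now : Char) (b c d : Int),
    (now = 'o' ∨ now = 'l' ∨ now = 'f') → 1 ≤ b →
    resOf (checkLoop l now [0, b, c, d]) = 0 := by
  induction l with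
  | nil =>
    intro now b c d _ hb
    have h0 : pvAllEqA [0, b, c, d] = false :=
      allEq_false _ _ _ _ (by rintro ⟨hb0, -, -⟩; omega)
    simp [checkLoop, resOf, h0]
  | cons ch rest ih =>
    intro now b c d hnow hb
    rcases hnow with h | h | h <;> subst h
    · by_cases hch : ch = 'o'
      · subst hch
        simp only [checkLoop, BEq.rfl, if_pos, bump_o]
        exact ih 'o' (b + 1) c d (Or.inl rfl) (by omega)
      · by_cases hch2 : ch = 'l'
        · subst hch2
          simp only [checkLoop]
          rw [if_neg (by simp), nxt_o]
          simp only [BEq.rfl, if_pos]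
          rw [if_neg (show ¬(('l' == 'w') = true) by decide), bump_l]
          exact ih 'l' b (c + 1) d (Or.inr (Or.inl rfl)) hb
        · simp only [checkLoop]
          rw [if_neg (by simp [Ne.symm hch]), nxt_o, if_neg (by simp [Ne.symm hch2])]
          rfl
    · by_cases hch : ch = 'l'
      · subst hch
        simp only [checkLoop, BEq.rfl, if_pos, bump_l]
        exact ih 'l' b (c + 1) d (Or.inr (Or.inl rfl)) hb
      · by_cases hch2 : ch = 'f'
        · subst hch2
          simp only [checkLoop]
          rw [if_neg (by simp), nxt_l]
          simp only [BEq.rfl, if_pos]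
          rw [if_neg (show ¬(('f' == 'w') = true) by decide), bump_f]
          exact ih 'f' b c (d + 1) (Or.inr (Or.inr rfl)) hb
        · simp only [checkLoop]
          rw [if_neg (by simp [Ne.symm hch]), nxt_l, if_neg (by simp [Ne.symm hch2])]
          rfl
    · by_cases hch : ch = 'f'
      · subst hch
        simp only [checkLoop, BEq.rfl, if_pos, bump_f]
        exact ih 'f' b c (d + 1) (Or.inr (Or.inr rfl)) hb
      · by_cases hch2 : ch = 'w'
        · subst hch2
          simp only [checkLoop]
          rw [if_neg (by simp), nxt_f]
          have h0 : pvAllEqA [0, b, c, d] = false :=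
            allEq_false _ _ _ _ (by rintro ⟨hb0, -, -⟩; omega)
          simp only [BEq.rfl, if_pos]
          rw [h0]
          simp [resOf]
        · simp only [checkLoop]
          rw [if_neg (by simp [Ne.symm hch]), nxt_f, if_neg (by simp [Ne.symm hch2])]
          rfl


lemma runsOf_nil : runsOf [] = [] := by rw [runsOf]

-- boolean chunk condition vs the wrap/final check of A
lemma chunk_cond_true (k k2 k3 k4 : Int) (h : k2 = k ∧ k3 = k ∧ k4 = k) :
    (k == k2 && k2 == k3 && k3 == k4) = true := by
  obtain ⟨h2, h3, h4⟩ := h; subst h2; subst h3; subst h4; simp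

lemma chunk_cond_false (k k2 k3 k4 : Int) (h : ¬(k2 = k ∧ k3 = k ∧ k4 = k)) :
    (k == k2 && k2 == k3 && k3 == k4) = false := by
  simp only [Bool.and_eq_false_iff, beq_eq_false_iff_ne, ne_eq]
  by_cases a : k = k2
  · by_cases b : k2 = k3
    · right; omega
    · left; right; exact b
  · left; left; exact a

-- stage 4: state ('f', [k,k2,k3,k4]); the suffix starts after the 'f' run
lemma stage_f (n : Nat)
    (ih : ∀ (l : List Char) (k : Int), l.length ≤ n → 1 ≤ k →
      (∀ x xs, l = x :: xs → x ≠ 'w') →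
      resOf (checkLoop l 'w' [k, 0, 0, 0])
        = if validRuns (('w', k) :: runsOf l) then 1 else 0) :
    ∀ (l4 : List Char) (k k2 k3 k4 : Int), l4.length ≤ n → 1 ≤ k →
      (∀ x xs, l4 = x :: xs → x ≠ 'f') →
      resOf (checkLoop l4 'f' [k, k2, k3, k4])
        = if validRuns (('w', k) :: ('o', k2) :: ('l', k3) :: ('f', k4) :: runsOf l4)
          then 1 else 0 := by
  intro l4 k k2 k3 k4 hlen hk hhead
  cases l4 with
  | nil =>
    rw [runsOf_nil, validRuns_chunk, validRuns]
    by_cases h : k2 = k ∧ k3 = k ∧ k4 = k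
    · rw [if_pos (by simp [chunk_cond_true k k2 k3 k4 h])]
      obtain ⟨h2, h3, h4⟩ := h; subst h2; subst h3; subst h4
      simp [checkLoop, resOf, allEq_iff]
    · rw [if_neg (by simp [chunk_cond_false k k2 k3 k4 h])]
      simp [checkLoop, resOf, allEq_false _ _ _ _ h]
  | cons c4 cs4 =>
    have hc4 : c4 ≠ 'f' := hhead c4 cs4 rfl
    have hdrop : (cs4.dropWhile (fun x => x == 'w')).length ≤ n := by
      have h1 := List.length_dropWhile_le (fun x => x == 'w') cs4
      simp only [List.length_cons] at hlen
      omega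
    by_cases hw : c4 = 'w'
    · subst hw
      rw [runsOf_cons, validRuns_chunk]
      simp only [checkLoop]
      rw [if_neg (by decide), nxt_f,
        if_pos (show (('w' == 'w') = true) by decide),
        if_pos (show (('w' == 'w') = true) by decide)]
      by_cases h : k2 = k ∧ k3 = k ∧ k4 = k
      · rw [if_pos ((allEq_iff k k2 k3 k4).mpr h), bump_w]
        conv_lhs => rw [run_split 'w' cs4]
        rw [consume_w]
        simp only [zero_add]
        rw [ih _ _ hdrop (by omega) (fun x xs hx => run_split_head 'w' x cs4 xs hx)]
        simp [chunk_cond_true k k2 k3 k4 h]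
      · rw [if_neg (by rw [allEq_iff]; exact h)]
        simp [resOf, chunk_cond_false k k2 k3 k4 h]
    · rw [runsOf_cons, validRuns_chunk]
      simp only [checkLoop]
      rw [if_neg (by simp [Ne.symm hc4]), nxt_f, if_neg (by simp [Ne.symm hw])]
      rw [validRuns_not_w c4 _ _ hw]
      simp [resOf]

-- stage 3: state ('l', [k,k2,k3,0]); the suffix starts after the 'l' run
lemma stage_l (n : Nat)
    (ih : ∀ (l : List Char) (k : Int), l.length ≤ n → 1 ≤ k →
      (∀ x xs, l = x :: xs → x ≠ 'w') →
      resOf (checkLoop l 'w' [k, 0, 0, 0])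
        = if validRuns (('w', k) :: runsOf l) then 1 else 0) :
    ∀ (l3 : List Char) (k k2 k3 : Int), l3.length ≤ n → 1 ≤ k →
      (∀ x xs, l3 = x :: xs → x ≠ 'l') →
      resOf (checkLoop l3 'l' [k, k2, k3, 0])
        = if validRuns (('w', k) :: ('o', k2) :: ('l', k3) :: runsOf l3)
          then 1 else 0 := by
  intro l3 k k2 k3 hlen hk hhead
  cases l3 with
  | nil =>
    rw [runsOf_nil, validRuns_three]
    have h0 : pvAllEqA [k, k2, k3, 0] = false :=
      allEq_false _ _ _ _ (by rintro ⟨-, -, h⟩; omega)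
    simp [checkLoop, resOf, h0]
  | cons c3 cs3 =>
    have hc3 : c3 ≠ 'l' := hhead c3 cs3 rfl
    have hdrop : (cs3.dropWhile (fun x => x == 'f')).length ≤ n := by
      have h1 := List.length_dropWhile_le (fun x => x == 'f') cs3
      simp only [List.length_cons] at hlen
      omega
    by_cases hf : c3 = 'f'
    · subst hf
      rw [runsOf_cons]
      simp only [checkLoop]
      rw [if_neg (by decide), nxt_l,
        if_pos (show (('f' == 'f') = true) by decide),
        if_neg (show ¬(('f' == 'w') = true) by decide), bump_f]
      simp only [zero_add]
      conv_lhs => rw [run_split 'f' cs3]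
      rw [consume_f]
      exact stage_f n ih _ k k2 k3 _ hdrop hk
        (fun x xs hx => run_split_head 'f' x cs3 xs hx)
    · rw [runsOf_cons]
      simp only [checkLoop]
      rw [if_neg (by simp [Ne.symm hc3]), nxt_l, if_neg (by simp [Ne.symm hf])]
      rw [validRuns_not_f _ _ _ c3 _ _ hf]
      simp [resOf]

-- stage 2: state ('o', [k,k2,0,0]); the suffix starts after the 'o' run
lemma stage_o (n : Nat)
    (ih : ∀ (l : List Char) (k : Int), l.length ≤ n → 1 ≤ k →
      (∀ x xs, l = x :: xs → x ≠ 'w') →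
      resOf (checkLoop l 'w' [k, 0, 0, 0])
        = if validRuns (('w', k) :: runsOf l) then 1 else 0) :
    ∀ (l2 : List Char) (k k2 : Int), l2.length ≤ n → 1 ≤ k →
      (∀ x xs, l2 = x :: xs → x ≠ 'o') →
      resOf (checkLoop l2 'o' [k, k2, 0, 0])
        = if validRuns (('w', k) :: ('o', k2) :: runsOf l2) then 1 else 0 := by
  intro l2 k k2 hlen hk hhead
  cases l2 with
  | nil =>
    rw [runsOf_nil, validRuns_two]
    have h0 : pvAllEqA [k, k2, 0, 0] = false :=
      allEq_false _ _ _ _ (by rintro ⟨-, h, -⟩; omega)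
    simp [checkLoop, resOf, h0]
  | cons c2 cs2 =>
    have hc2 : c2 ≠ 'o' := hhead c2 cs2 rfl
    have hdrop : (cs2.dropWhile (fun x => x == 'l')).length ≤ n := by
      have h1 := List.length_dropWhile_le (fun x => x == 'l') cs2
      simp only [List.length_cons] at hlen
      omega
    by_cases hl : c2 = 'l'
    · subst hl
      rw [runsOf_cons]
      simp only [checkLoop]
      rw [if_neg (by decide), nxt_o,
        if_pos (show (('l' == 'l') = true) by decide),
        if_neg (show ¬(('l' == 'w') = true) by decide), bump_l]
      simp only [zero_add]
      conv_lhs => rw [run_split 'l' cs2]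
      rw [consume_l]
      exact stage_l n ih _ k k2 _ hdrop hk
        (fun x xs hx => run_split_head 'l' x cs2 xs hx)
    · rw [runsOf_cons]
      simp only [checkLoop]
      rw [if_neg (by simp [Ne.symm hc2]), nxt_o, if_neg (by simp [Ne.symm hl])]
      rw [validRuns_not_l _ _ c2 _ _ hl]
      simp [resOf]

-- stage 1: state ('w', [k,0,0,0]); the suffix starts after a 'w' run of length k ≥ 1
lemma main_w : ∀ (n : Nat) (l : List Char) (k : Int), l.length ≤ n → 1 ≤ k →
    (∀ x xs, l = x :: xs → x ≠ 'w') →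
    resOf (checkLoop l 'w' [k, 0, 0, 0])
      = if validRuns (('w', k) :: runsOf l) then 1 else 0 := by
  intro n
  induction n with
  | zero =>
    intro l k hl hk _
    rw [List.length_eq_zero_iff.mp (Nat.le_zero.mp hl)]
    rw [runsOf_nil, validRuns_one]
    have h0 : pvAllEqA [k, 0, 0, 0] = false :=
      allEq_false _ _ _ _ (by rintro ⟨h, -, -⟩; omega)
    simp [checkLoop, resOf, h0]
  | succ n ih =>
    intro l k hl hk hhead
    cases l with
    | nil =>
      rw [runsOf_nil, validRuns_one]
      have h0 : pvAllEqA [k, 0, 0, 0] = false :=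
        allEq_false _ _ _ _ (by rintro ⟨h, -, -⟩; omega)
      simp [checkLoop, resOf, h0]
    | cons c cs =>
      have hc : c ≠ 'w' := hhead c cs rfl
      have hdrop : (cs.dropWhile (fun x => x == 'o')).length ≤ n := by
        have h1 := List.length_dropWhile_le (fun x => x == 'o') cs
        simp only [List.length_cons] at hl
        omega
      by_cases ho : c = 'o'
      · subst ho
        rw [runsOf_cons]
        simp only [checkLoop]
        rw [if_neg (by decide), nxt_w,
          if_pos (show (('o' == 'o') = true) by decide),
          if_neg (show ¬(('o' == 'w') = true) by decide), bump_o]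
        simp only [zero_add]
        conv_lhs => rw [run_split 'o' cs]
        rw [consume_o]
        exact stage_o n ih _ k _ hdrop hk
          (fun x xs hx => run_split_head 'o' x cs xs hx)
      · rw [runsOf_cons]
        simp only [checkLoop]
        rw [if_neg (by simp [Ne.symm hc]), nxt_w, if_neg (by simp [Ne.symm ho])]
        rw [validRuns_not_o _ c _ _ ho]
        simp [resOf]

-- ===== VERDICT (by name: the statement is the Claim_ definition above) =====
theorem check_spec : Claim_equal_check := by
  unfold Claim_equal_check Spec_check
  intro word _
  rw [check_eq_resOf]
  unfold check_alt
  cases word.toList with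
  | nil => simp [checkLoop, resOf, runsOf_nil, validRuns, pvAllEqA]
  | cons c cs =>
    by_cases hw : c = 'w'
    · subst hw
      rw [runsOf_cons]
      simp only [checkLoop]
      rw [if_pos (show (('w' == 'w') = true) by decide), bump_w]
      simp only [zero_add]
      conv_lhs => rw [run_split 'w' cs]
      rw [consume_w]
      exact main_w (cs.dropWhile (fun x => x == 'w')).length _ _ le_rfl (by omega)
        (fun x xs hx => run_split_head 'w' x cs xs hx)
    · by_cases ho : c = 'o'
      · subst ho
        rw [runsOf_cons, validRuns_not_w 'o' _ _ (by decide)]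
        simp only [checkLoop]
        rw [if_neg (by decide), nxt_w,
          if_pos (show (('o' == 'o') = true) by decide),
          if_neg (show ¬(('o' == 'w') = true) by decide), bump_o]
        simp only [zero_add]
        conv_lhs => rw [run_split 'o' cs]
        rw [consume_o]
        rw [fail_lemma _ 'o' _ _ _ (Or.inl rfl) (by omega)]
        simp
      · rw [runsOf_cons, validRuns_not_w c _ _ hw]
        simp only [checkLoop]
        rw [if_neg (by simp [Ne.symm hw]), nxt_w, if_neg (by simp [Ne.symm ho])]
        simp [resOf]
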